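-- pv_equiv track=rewrite | github.com/ybgdgh/VLN-Game | agents/dataset_mapping_agent.py | process_tag_classes
-- ===== SOURCE A (Python) =====
-- from typing import Dict, Optional, Any, List
--
-- def process_tag_classes(text_prompt:str, add_classes:List[str]=[], remove_classes:List[str]=[]) -> list[str]:
--     '''
--     Convert a text prompt from Tag2Text to a list of classes.
--     '''
--     classes = text_prompt.split(',')
--     classes = [obj_class.strip() for obj_class in classes]
--     classes = [obj_class for obj_class in classes if obj_class != '']
--
--     for c in add_classes:
--         if c not in classes:
--             classes.append(c)
--
--     for c in remove_classes:
--         classes = [obj_class for obj_class in classes if c not in obj_class.lower()]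
--
--     return classes
-- ===== SOURCE B (Python) =====
-- def process_tag_classes(text_prompt: str, add_classes=[], remove_classes=[]) -> list:
--     '''
--     Convert a text prompt from Tag2Text to a list of classes.
--     '''
--     # single-pass character scanner: tokens between commas, trimmed on the fly
--     classes = []
--     cur = []    # current token, no leading/trailing whitespace
--     pend = []   # whitespace seen after cur, pending until more non-space arrives
--     for ch in text_prompt:
--         if ch == ',':
--             if cur:
--                 classes.append(''.join(cur))
--             cur, pend = [], []
--         elif ch.isspace():
--             if cur:
--                 pend.append(ch)
--         else:
--             cur = cur + pend + [ch]
--             pend = []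
--     if cur:
--         classes.append(''.join(cur))
--
--     seen = set(classes)
--     for c in add_classes:
--         if c not in seen:
--             classes.append(c)
--             seen.add(c)
--
--     return [o for o in classes
--             if all(c not in o.lower() for c in remove_classes)]
-- ===== Notes on version B (the rewrite author's own statement) =====
-- stated objective: alternative
-- what changed: A's three staged list passes (split, strip each piece, drop empties) are replaced by a single character-level scanner that emits trimmed non-empty tokens in one pass over the string, the add loop is backed by a set of seen names, and A's len(remove_classes) sequential filter passes become one filtering pass testing each element against all remove classes.
import Mathlib
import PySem

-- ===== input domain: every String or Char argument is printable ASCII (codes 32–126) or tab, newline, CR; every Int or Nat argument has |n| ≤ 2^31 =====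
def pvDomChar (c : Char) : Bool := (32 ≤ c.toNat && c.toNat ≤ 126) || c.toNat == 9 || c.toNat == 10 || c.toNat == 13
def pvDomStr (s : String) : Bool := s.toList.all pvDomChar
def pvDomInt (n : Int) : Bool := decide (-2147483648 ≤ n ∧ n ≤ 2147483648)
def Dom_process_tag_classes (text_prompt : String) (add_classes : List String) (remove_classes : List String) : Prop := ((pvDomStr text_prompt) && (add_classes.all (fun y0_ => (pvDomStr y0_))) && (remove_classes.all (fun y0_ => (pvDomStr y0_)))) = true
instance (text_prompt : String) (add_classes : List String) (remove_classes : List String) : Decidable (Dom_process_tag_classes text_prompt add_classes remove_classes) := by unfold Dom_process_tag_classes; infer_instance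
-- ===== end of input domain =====

-- B replaces A's three staged passes (split, strip each piece, drop empties) by one character-level
-- scanner emitting trimmed tokens, backs the add loop with a set of seen names, and fuses A's
-- per-remove-class filter passes into one filtering pass (alternative decomposition, same cost).

-- ===== PORT A =====
def process_tag_classes (text_prompt : String) (add_classes : List String) (remove_classes : List String) : List String :=
  -- split? is always `some` for the non-empty literal separator ","; getD [] never fires
  let classes := (PySem.Str.split? text_prompt ",").getD []
  let classes := classes.map (fun obj_class => PySem.Str.strip obj_class)
  let classes := classes.filter (fun obj_class => obj_class != "")
  let classes := add_classes.foldl (fun cs c => if cs.contains c then cs else cs ++ [c]) classes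
  remove_classes.foldl
    (fun cs c => cs.filter (fun obj_class => !(PySem.Str.isIn c (PySem.Str.lower obj_class)))) classes

-- ===== PORT B =====
-- loop body of Source B's character scanner: state (classes, cur, pend)
def scanStep (st : List String × List Char × List Char) (ch : Char) : List String × List Char × List Char :=
  if ch = ',' then
    (if st.2.1.isEmpty then st.1 else st.1 ++ [String.ofList st.2.1], [], [])
  else if PySem.Chars.isspace ch then
    (st.1, st.2.1, if st.2.1.isEmpty then st.2.2 else st.2.2 ++ [ch])
  else
    (st.1, st.2.1 ++ st.2.2 ++ [ch], [])

-- the trailing `if cur: classes.append(''.join(cur))`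
def scanFinish (st : List String × List Char × List Char) : List String :=
  if st.2.1.isEmpty then st.1 else st.1 ++ [String.ofList st.2.1]

def process_tag_classes_alt (text_prompt : String) (add_classes : List String) (remove_classes : List String) : List String :=
  let classes := scanFinish (text_prompt.toList.foldl scanStep ([], [], []))
  -- add loop with the `seen` set alongside the list
  let st := add_classes.foldl
    (fun (st : List String × PySem.Set String) c =>
      if st.2.contains c then st else (st.1 ++ [c], st.2.add c))
    (classes, PySem.Set.ofList classes)
  st.1.filter (fun o => remove_classes.all (fun c => !(PySem.Str.isIn c (PySem.Str.lower o))))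

-- ===== PRECONDITION & SPEC =====
def Spec_process_tag_classes (text_prompt : String) (add_classes : List String) (remove_classes : List String) (out : List String) : Prop := out = process_tag_classes_alt text_prompt add_classes remove_classes
instance (text_prompt : String) (add_classes : List String) (remove_classes : List String) (out : List String) : Decidable (Spec_process_tag_classes text_prompt add_classes remove_classes out) := by unfold Spec_process_tag_classes; infer_instance

-- ===== CLAIM (what is proved, stated in full; the proofs are below) =====
def Claim_equal_process_tag_classes : Prop := ∀ (text_prompt : String) (add_classes : List String) (remove_classes : List String), Dom_process_tag_classes text_prompt add_classes remove_classes → Spec_process_tag_classes text_prompt add_classes remove_classes (process_tag_classes text_prompt add_classes remove_classes)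

-- ===== LEMMAS AND PROOFS =====

-- reference single-char splitter: split1 cs = cs.split(',') at the char-list level
def split1 : List Char → List (List Char)
  | [] => [[]]
  | c :: r => if c = ',' then [] :: split1 r else (split1 r).modifyHead (fun t => c :: t)

theorem split1_exists_cons (cs : List Char) : ∃ h t, split1 cs = h :: t := by
  cases cs with
  | nil => exact ⟨[], [], rfl⟩
  | cons c r =>
    obtain ⟨h, t, hht⟩ := split1_exists_cons r
    by_cases hc : c = ','
    · exact ⟨[], split1 r, by simp [split1, hc]⟩
    · exact ⟨c :: h, t, by simp [split1, hc, hht]⟩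

theorem go_eq (l : List Char) : ∀ (fuel : Nat) (cur : List Char) (acc : List (List Char)),
    l.length ≤ fuel →
    PySem.Chars.splitOn.go [','] fuel l cur acc
      = acc.reverse ++ (split1 l).modifyHead (fun t => cur.reverse ++ t) := by
  induction l with
  | nil =>
    intro fuel cur acc _
    cases fuel <;> simp [PySem.Chars.splitOn.go, split1]
  | cons c rest ih =>
    intro fuel cur acc hfuel
    cases fuel with
    | zero => simp at hfuel
    | succ f =>
      by_cases hc : c = ','
      · subst hc
        have hpre : [','].isPrefixOf (',' :: rest) = true := by simp [List.isPrefixOf]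
        simp only [PySem.Chars.splitOn.go, hpre, if_pos]
        rw [show List.drop [','].length (',' :: rest) = rest from rfl]
        rw [ih f [] (cur.reverse :: acc) (by simpa using Nat.le_of_succ_le_succ hfuel)]
        simp [split1]
        exact congrFun List.modifyHead_id (split1 rest)
      · have hpre : [','].isPrefixOf (c :: rest) = false := by
          simp [List.isPrefixOf]; exact fun h => absurd h.symm hc
        simp only [PySem.Chars.splitOn.go, hpre, Bool.false_eq_true, if_false]
        rw [ih f (c :: cur) acc (by simpa using Nat.le_of_succ_le_succ hfuel)]
        obtain ⟨h, t, hht⟩ := split1_exists_cons rest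
        simp [split1, hc, hht]

theorem splitOn_comma (cs : List Char) : PySem.Chars.splitOn cs [','] = split1 cs := by
  unfold PySem.Chars.splitOn
  rw [go_eq cs (cs.length + 1) [] [] (by omega)]
  obtain ⟨h, t, hht⟩ := split1_exists_cons cs
  simp [hht]

-- strip facts used by the scanner invariant
theorem head_not_space (a : Char) (l : List Char)
    (hl : PySem.Chars.lstrip (a :: l) = a :: l) : PySem.Chars.isspace a = false := by
  by_cases h : PySem.Chars.isspace a = true
  · exfalso
    simp only [PySem.Chars.lstrip, List.dropWhile_cons, h, if_pos] at hl
    have h1 := List.length_dropWhile_le PySem.Chars.isspace l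
    have h2 := congrArg List.length hl
    simp at h2; omega
  · simpa using h

theorem lstrip_fix_append (cur xs : List Char) (hl : PySem.Chars.lstrip cur = cur)
    (hne : cur ≠ []) : PySem.Chars.lstrip (cur ++ xs) = cur ++ xs := by
  cases cur with
  | nil => exact absurd rfl hne
  | cons a l =>
    have ha := head_not_space a l hl
    simp [PySem.Chars.lstrip, ha]

theorem rstrip_append_nonws (xs : List Char) (c : Char)
    (hc : PySem.Chars.isspace c = false) :
    PySem.Chars.rstrip (xs ++ [c]) = xs ++ [c] := by
  simp [PySem.Chars.rstrip, List.reverse_append, hc]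

theorem strip_append_ws (cur pend : List Char)
    (hp : pend.all PySem.Chars.isspace = true) (h0 : cur = [] → pend = [])
    (hl : PySem.Chars.lstrip cur = cur) (hr : PySem.Chars.rstrip cur = cur) :
    PySem.Chars.strip (cur ++ pend) = cur := by
  cases hcur : cur with
  | nil =>
    subst hcur
    simp [h0 rfl, PySem.Chars.strip, PySem.Chars.lstrip, PySem.Chars.rstrip]
  | cons a l =>
    subst hcur
    have hdropP : List.dropWhile PySem.Chars.isspace pend.reverse = [] := by
      rw [List.dropWhile_eq_nil_iff]
      intro x hx
      exact List.all_eq_true.mp hp x (List.mem_reverse.mp hx)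
    have hdropC : List.dropWhile PySem.Chars.isspace (a :: l).reverse = (a :: l).reverse := by
      have := congrArg List.reverse hr
      simpa [PySem.Chars.rstrip] using this
    unfold PySem.Chars.strip
    rw [lstrip_fix_append _ _ hl (by simp)]
    unfold PySem.Chars.rstrip
    rw [List.reverse_append, List.dropWhile_append, hdropP]
    rw [if_pos (show (([] : List (Char))).isEmpty = true from rfl), hdropC, List.reverse_reverse]

theorem strip_ws_cons (c : Char) (t : List Char) (hc : PySem.Chars.isspace c = true) :
    PySem.Chars.strip (c :: t) = PySem.Chars.strip t := by
  simp [PySem.Chars.strip, PySem.Chars.lstrip, hc]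

-- the scanner computes "split, strip, drop empties" (stated over the generalized loop state)
theorem scan_spec (cs : List Char) : ∀ (base : List String) (cur pend : List Char),
    pend.all PySem.Chars.isspace = true → (cur = [] → pend = []) →
    PySem.Chars.lstrip cur = cur → PySem.Chars.rstrip cur = cur →
    scanFinish (cs.foldl scanStep (base, cur, pend))
      = base ++ ((((split1 cs).modifyHead (fun t => cur ++ pend ++ t)).map
          PySem.Chars.strip).filter (fun t => !t.isEmpty)).map String.ofList := by
  induction cs with
  | nil =>
    intro base cur pend hp h0 hl hr
    simp only [List.foldl_nil, scanFinish, split1, List.modifyHead, List.map, List.append_nil,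
      strip_append_ws cur pend hp h0 hl hr]
    cases cur <;> simp
  | cons c rest ih =>
    intro base cur pend hp h0 hl hr
    by_cases hc : c = ','
    · subst hc
      have hstep : scanStep (base, cur, pend) ','
          = (if cur.isEmpty then base else base ++ [String.ofList cur], [], []) := by
        simp [scanStep]
      rw [List.foldl_cons, hstep,
        ih _ [] [] (by simp) (fun _ => rfl) (by simp [PySem.Chars.lstrip])
          (by simp [PySem.Chars.rstrip])]
      obtain ⟨h, t, hht⟩ := split1_exists_cons rest
      simp [split1, hht, strip_append_ws cur pend hp h0 hl hr]
      cases cur <;> simp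
    · by_cases hs : PySem.Chars.isspace c = true
      · -- whitespace character
        have hcomma : (c = ',') = False := by simp [hc]
        by_cases hcur : cur = []
        · subst hcur
          have hstep : scanStep (base, ([] : List Char), pend) c = (base, [], pend) := by
            simp [scanStep, hc, hs]
          rw [List.foldl_cons, hstep, ih _ [] pend hp h0 hl hr]
          obtain ⟨h, t, hht⟩ := split1_exists_cons rest
          simp [split1, hc, hht, h0 rfl, strip_ws_cons c h hs]
        · have hstep : scanStep (base, cur, pend) c = (base, cur, pend ++ [c]) := by
            simp [scanStep, hc, hs, hcur]
          rw [List.foldl_cons, hstep,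
            ih _ cur (pend ++ [c]) (by simp [List.all_append, hp, hs])
              (fun h => absurd h hcur) hl hr]
          obtain ⟨h, t, hht⟩ := split1_exists_cons rest
          simp [split1, hc, hht]
      · -- ordinary character
        have hs' : PySem.Chars.isspace c = false := by simpa using hs
        have hstep : scanStep (base, cur, pend) c = (base, cur ++ pend ++ [c], []) := by
          simp [scanStep, hc, hs']
        have hl' : PySem.Chars.lstrip (cur ++ pend ++ [c]) = cur ++ pend ++ [c] := by
          by_cases hcur : cur = []
          · subst hcur
            simp [h0 rfl, PySem.Chars.lstrip, hs']
          · rw [List.append_assoc]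
            exact lstrip_fix_append cur (pend ++ [c]) hl hcur
        rw [List.foldl_cons, hstep,
          ih _ (cur ++ pend ++ [c]) [] (by simp)
            (by intro h; simp at h) hl' (rstrip_append_nonws _ c hs')]
        obtain ⟨h, t, hht⟩ := split1_exists_cons rest
        simp [split1, hc, hht]

-- String.ofList bookkeeping for the "drop empties" filter
theorem ofList_ne_empty (t : List Char) : (String.ofList t != "") = !t.isEmpty := by
  cases t with
  | nil => rfl
  | cons a l =>
    have : String.ofList (a :: l) ≠ "" := by
      intro h
      have := congrArg String.toList h
      simp at this
    simp [this]

-- A's parsing pipeline equals the char-level "split1, strip, drop empties"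
theorem parse_eq (text : String) :
    ((((PySem.Str.split? text ",").getD []).map (fun s => PySem.Str.strip s)).filter
        (fun s => s != ""))
      = (((split1 text.toList).map PySem.Chars.strip).filter
          (fun t => !t.isEmpty)).map String.ofList := by
  have hsep : ("," : String).toList = [','] := by decide
  have hsplit : PySem.Str.split? text ","
      = some ((split1 text.toList).map String.ofList) := by
    simp [PySem.Str.split?, PySem.Chars.split?, hsep, splitOn_comma]
  rw [hsplit]
  simp only [Option.getD_some, List.map_map]
  have hfun : ((fun s => PySem.Str.strip s) ∘ String.ofList)
      = (String.ofList ∘ PySem.Chars.strip) := by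
    funext t
    simp [Function.comp, PySem.Str.strip]
  rw [hfun, List.filter_map, List.filter_map, List.map_map]
  have hf : ∀ t ∈ split1 text.toList,
      ((fun s => s != "") ∘ (String.ofList ∘ PySem.Chars.strip)) t
        = ((fun t => !t.isEmpty) ∘ PySem.Chars.strip) t := by
    intro t _
    simp [Function.comp, ofList_ne_empty]
  rw [List.filter_congr hf]

theorem contains_append_singleton (l : List String) (x c : String) :
    (l ++ [c]).contains x = (l.contains x || x == c) := by
  rw [Bool.eq_iff_iff]; simp [List.mem_append]

-- B's pair fold (list + seen set) computes A's append loop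
theorem add_pair (l : List String) : ∀ (acc : List String) (seen : PySem.Set String),
    (∀ x, seen.contains x = acc.contains x) →
    (l.foldl (fun (st : List String × PySem.Set String) c =>
        if st.2.contains c then st else (st.1 ++ [c], st.2.add c)) (acc, seen)).1
      = l.foldl (fun cs c => if cs.contains c then cs else cs ++ [c]) acc := by
  induction l with
  | nil => intro acc seen _; rfl
  | cons c rest ih =>
    intro acc seen hinv
    simp only [List.foldl_cons, hinv c]
    by_cases hc : acc.contains c = true
    · simp only [hc, if_pos]
      exact ih acc seen hinv
    · simp only [hc, Bool.false_eq_true, if_false]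
      refine ih (acc ++ [c]) (seen.add c) ?_
      have hcf : acc.contains c = false := by
        rw [Bool.eq_false_iff]; exact hc
      have hsc : PySem.Set.contains seen c = false := (hinv c).trans hcf
      have hAdd : seen.add c = seen ++ [c] := by
        rw [PySem.Set.add, if_neg]
        intro hmem
        rw [hsc] at hmem
        cases hmem
      intro x
      rw [hAdd]
      show List.contains (seen ++ [c]) x = List.contains (acc ++ [c]) x
      rw [contains_append_singleton, contains_append_singleton,
        show List.contains seen x = List.contains acc x from hinv x]

-- A's sequence of filter passes equals one filter with an `all` test
theorem remove_loop_eq (rem : List String) : ∀ (cs : List String),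
    rem.foldl
      (fun cs c => cs.filter (fun o => !(PySem.Str.isIn c (PySem.Str.lower o)))) cs
      = cs.filter (fun o => rem.all (fun c => !(PySem.Str.isIn c (PySem.Str.lower o)))) := by
  induction rem with
  | nil => intro cs; simp
  | cons c rem ih =>
    intro cs
    simp only [List.foldl_cons, ih, List.filter_filter, List.all_cons]
    apply List.filter_congr
    intro o _
    cases PySem.Str.isIn c (PySem.Str.lower o) <;>
      cases rem.all (fun c => !(PySem.Str.isIn c (PySem.Str.lower o))) <;> rfl

-- ===== VERDICT (by name: the statement is the Claim_ definition above) =====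
theorem process_tag_classes_spec : Claim_equal_process_tag_classes := by
  intro text add rem _
  unfold Spec_process_tag_classes
  simp only [process_tag_classes, process_tag_classes_alt]
  have hscan : scanFinish (text.toList.foldl scanStep ([], [], []))
      = (((split1 text.toList).map PySem.Chars.strip).filter
          (fun t => !t.isEmpty)).map String.ofList := by
    have := scan_spec text.toList [] [] [] (by simp) (fun _ => rfl)
      (by simp [PySem.Chars.lstrip]) (by simp [PySem.Chars.rstrip])
    obtain ⟨h, t, hht⟩ := split1_exists_cons text.toList
    simpa [hht] using this
  rw [hscan, ← parse_eq text]
  set base := ((((PySem.Str.split? text ",").getD []).map (fun s => PySem.Str.strip s)).filter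
      (fun s => s != "")) with hbase
  have hinv : ∀ x, (PySem.Set.ofList base).contains x = base.contains x := by
    intro x
    simp only [PySem.Set.contains]
    rw [Bool.eq_iff_iff]
    simp [PySem.Set.mem_ofList]
  rw [add_pair add base (PySem.Set.ofList base) hinv, remove_loop_eq]
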